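-- pv_equiv track=rewrite | github.com/evanbowman/skyland-gba | tools/encode_files.py | replace_symbols_in_code
-- ===== SOURCE A (Python) =====
-- def replace_symbols_in_code(code, index_map):
--     """Replace whole symbol tokens in a code region (no strings, no comments)."""
--     result = []
--     i = 0
--     while i < len(code):
--         c = code[i]
--         if c in '() \t\n\r,\'@':
--             result.append(c)
--             i += 1
--         else:
--             # Collect a token
--             j = i
--             while j < len(code) and code[j] not in '() \t\n\r,\'@':
--                 j += 1
--             token = code[i:j]
--             replacement = index_map.get(token)
--             if replacement is not None:
--                 result.append(replacement)
--             else: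
--                 result.append(token)
--             i = j
--     return ''.join(result)
-- ===== SOURCE B (Python) =====
-- import re
--
-- # One split over the exact delimiter class, then a flat map over the pieces:
-- # even positions are (possibly empty) tokens, odd positions are single delimiters.
-- _DELIMS = re.compile(r"([()\ \t\n\r,'@])")
--
--
-- def replace_symbols_in_code(code, index_map):
--     """Replace whole symbol tokens in a code region (no strings, no comments)."""
--     parts = _DELIMS.split(code)
--     return ''.join(
--         index_map.get(p, p) if k % 2 == 0 and p else p
--         for k, p in enumerate(parts)
--     )
-- ===== Notes on version B (the rewrite author's own statement) =====
-- stated objective: idiomatic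
-- what changed: Replaces A's explicit while-loop index walking (outer position scan plus inner token-collection loop) with one re.split over a capturing delimiter class followed by a single flat map that substitutes only the non-empty even-position (token) pieces.
import Mathlib
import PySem

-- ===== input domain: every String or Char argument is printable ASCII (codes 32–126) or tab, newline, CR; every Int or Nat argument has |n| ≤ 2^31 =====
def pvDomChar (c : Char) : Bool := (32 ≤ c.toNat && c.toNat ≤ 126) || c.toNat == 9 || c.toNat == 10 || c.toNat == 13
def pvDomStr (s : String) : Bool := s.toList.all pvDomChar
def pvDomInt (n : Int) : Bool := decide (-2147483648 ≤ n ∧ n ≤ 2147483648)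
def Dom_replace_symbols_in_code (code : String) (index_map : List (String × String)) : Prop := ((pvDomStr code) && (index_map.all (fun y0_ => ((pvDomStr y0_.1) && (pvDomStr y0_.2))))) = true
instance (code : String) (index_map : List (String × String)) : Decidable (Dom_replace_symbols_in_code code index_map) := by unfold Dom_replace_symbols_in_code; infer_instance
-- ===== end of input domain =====

-- B replaces A's index-walking while-loops by one regex split into alternating
-- token/delimiter pieces plus a flat substitution map (objective: idiomatic).

def pvIsDelim (c : Char) : Bool := ['(', ')', ' ', '\t', '\n', '\r', ',', '\'', '@'].contains c

-- ===== PORT A =====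
-- outer while-loop over the remaining suffix; the inner token-collecting
-- while-loop is the takeWhile/dropWhile pair; dict.get = first-match lookup
def pvGoA (m : List (String × String)) : List Char → List (List Char)
  | [] => []
  | c :: cs =>
    if pvIsDelim c then
      [c] :: pvGoA m cs
    else
      let tok := c :: cs.takeWhile (fun x => !pvIsDelim x)
      (match m.lookup (String.ofList tok) with
       | some r => r.toList
       | none => tok) :: pvGoA m (cs.dropWhile (fun x => !pvIsDelim x))
termination_by cs => cs.length
decreasing_by
  · simp
  · simpa using Nat.lt_succ_of_le (List.length_dropWhile_le _ _)

def replace_symbols_in_code (code : String) (index_map : List (String × String)) : String :=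
  String.ofList ((pvGoA index_map code.toList).flatten)   -- ''.join(result)

-- ===== PORT B =====
-- hand port of re.split with the capturing class "([()\ \t\n\r,'@])": the result
-- alternates (possibly empty) maximal non-delimiter runs and single delimiters —
-- exact for this fixed regex
def pvSplit : List Char → List (List Char)
  | cs =>
    match h : cs.dropWhile (fun x => !pvIsDelim x) with
    | [] => [cs.takeWhile (fun x => !pvIsDelim x)]
    | d :: rest => cs.takeWhile (fun x => !pvIsDelim x) :: [d] :: pvSplit rest
termination_by cs => cs.length
decreasing_by
  have := List.length_dropWhile_le (fun x => !pvIsDelim x) cs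
  rw [h] at this; simp at this; omega

-- the enumerate-parity loop: even positions (tokens) are substituted when
-- non-empty, odd positions (delimiters) pass through — parity is realised by
-- consuming the alternating list two pieces at a time
def pvSubst (m : List (String × String)) : List (List Char) → List (List Char)
  | [] => []
  | [t] => [if t.isEmpty then t else ((m.lookup (String.ofList t)).getD (String.ofList t)).toList]
  | t :: d :: rest =>
      (if t.isEmpty then t else ((m.lookup (String.ofList t)).getD (String.ofList t)).toList)
        :: d :: pvSubst m rest

def replace_symbols_in_code_alt (code : String) (index_map : List (String × String)) : String :=
  String.ofList ((pvSubst index_map (pvSplit code.toList)).flatten)   -- ''.join(...)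

-- ===== PRECONDITION & SPEC =====
def Spec_replace_symbols_in_code (code : String) (index_map : List (String × String)) (out : String) : Prop := out = replace_symbols_in_code_alt code index_map
instance (code : String) (index_map : List (String × String)) (out : String) : Decidable (Spec_replace_symbols_in_code code index_map out) := by unfold Spec_replace_symbols_in_code; infer_instance

-- ===== CLAIM (what is proved, stated in full; the proofs are below) =====
def Claim_equal_replace_symbols_in_code : Prop := ∀ (code : String) (index_map : List (String × String)), Dom_replace_symbols_in_code code index_map → Spec_replace_symbols_in_code code index_map (replace_symbols_in_code code index_map)

-- ===== LEMMAS AND PROOFS =====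

-- head of a dropWhile residue fails the predicate
theorem pv_dropWhile_head {p : Char → Bool} {cs : List Char} {d : Char} {rest : List Char}
    (h : cs.dropWhile p = d :: rest) : p d = false := by
  have w : cs.dropWhile p ≠ [] := by simp [h]
  have h2 := List.head_dropWhile_not p w
  simpa [h] using h2

theorem pv_key (m : List (String × String)) : ∀ (n : Nat) (cs : List Char), cs.length ≤ n →
    (pvSubst m (pvSplit cs)).flatten = (pvGoA m cs).flatten := by
  intro n
  induction n with
  | zero =>
    intro cs hcs
    have : cs = [] := List.eq_nil_of_length_eq_zero (Nat.le_zero.mp hcs)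
    subst this
    simp [pvSplit, pvSubst, pvGoA]
  | succ n ih =>
    intro cs hcs
    match cs with
    | [] => simp [pvSplit, pvSubst, pvGoA]
    | c :: cs' =>
      by_cases hd : pvIsDelim c
      · -- delimiter head: both sides emit c and recurse on cs'
        rw [pvSplit]
        have hdw : (c :: cs').dropWhile (fun x => !pvIsDelim x) = c :: cs' := by
          simp [List.dropWhile, hd]
        rw [hdw]
        rw [pvGoA]
        simp only [hd, if_true]
        have htw : (c :: cs').takeWhile (fun x => !pvIsDelim x) = [] := by
          simp [List.takeWhile, hd]
        rw [htw, pvSubst]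
        simp only [List.flatten_cons, List.isEmpty_nil, if_true]
        rw [ih cs' (by simpa using hcs)]
        simp
      · -- token head
        have hp : (fun x => !pvIsDelim x) c = true := by simp [hd]
        have htw : (c :: cs').takeWhile (fun x => !pvIsDelim x)
            = c :: cs'.takeWhile (fun x => !pvIsDelim x) := by
          simp [List.takeWhile, hd]
        have hdw : (c :: cs').dropWhile (fun x => !pvIsDelim x)
            = cs'.dropWhile (fun x => !pvIsDelim x) := by
          simp [List.dropWhile, hd]
        rw [pvSplit, hdw, pvGoA]
        simp only [hd]
        set tok := c :: cs'.takeWhile (fun x => !pvIsDelim x) with htok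
        have hsub : (if tok.isEmpty then tok
            else ((m.lookup (String.ofList tok)).getD (String.ofList tok)).toList)
            = (match m.lookup (String.ofList tok) with
               | some r => r.toList
               | none => tok) := by
          cases m.lookup (String.ofList tok) <;> simp [htok]
        match hres : cs'.dropWhile (fun x => !pvIsDelim x) with
        | [] =>
          rw [htw, pvSubst, pvGoA]
          cases List.lookup (String.ofList tok) m <;> simp
        | d :: rest =>
          have hdel : pvIsDelim d := by
            have := pv_dropWhile_head hres
            simpa using this
          have hlen : rest.length ≤ n := by
            have h1 := List.length_dropWhile_le (fun x => !pvIsDelim x) cs'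
            rw [hres] at h1
            simp at h1
            simp at hcs
            omega
          rw [htw, pvSubst, pvGoA]
          simp only [hdel, if_true]
          simp only [List.flatten_cons, hsub]
          rw [ih rest hlen]
          simp

-- ===== VERDICT (by name: the statement is the Claim_ definition above) =====
theorem replace_symbols_in_code_spec : Claim_equal_replace_symbols_in_code := by
  intro code index_map _
  unfold Spec_replace_symbols_in_code replace_symbols_in_code replace_symbols_in_code_alt
  rw [pv_key index_map code.toList.length code.toList le_rfl]
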